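-- pv_equiv track=rewrite | github.com/ADScanPro/adscan | adscan_internal/services/attack_graph_service.py | _filter_contained_paths_for_domain_listing
-- ===== SOURCE A (Python) =====
-- from typing import Any, Callable, Iterable, cast
--
-- def _filter_contained_paths_for_domain_listing(
--     records: list[dict[str, Any]],
-- ) -> tuple[list[dict[str, Any]], int]:
--     """Remove paths that are fully contained within another longer path.
--
--     This is used only for the domain-wide view (`attack_paths <domain>`), where
--     showing both a path and its suffix/prefix variants is usually redundant.
--
--     Notes:
--         We treat containment as a *contiguous* subpath match on both nodes and
--         relations. Only strictly shorter paths are removed.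
--     """
--     if len(records) <= 1:
--         return records, 0
--
--     normalized: list[tuple[tuple[str, ...], tuple[str, ...], dict[str, Any]]] = []
--     for record in records:
--         nodes = record.get("nodes")
--         rels = record.get("relations")
--         if not isinstance(nodes, list) or not isinstance(rels, list):
--             continue
--         nodes_t = tuple(str(n) for n in nodes)
--         rels_t = tuple(str(r) for r in rels)
--         normalized.append((nodes_t, rels_t, record))
--
--     normalized.sort(key=lambda item: len(item[1]), reverse=True)
--
--     covered: set[tuple[tuple[str, ...], tuple[str, ...]]] = set()
--     kept: list[dict[str, Any]] = []
--     removed = 0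
--
--     for nodes_t, rels_t, record in normalized:
--         sig = (nodes_t, rels_t)
--         if sig in covered:
--             removed += 1
--             continue
--         kept.append(record)
--
--         # Mark all contiguous subpaths as covered so we can drop them later.
--         # Only mark strictly shorter subpaths.
--         rel_len = len(rels_t)
--         if rel_len <= 0:
--             continue
--         for start in range(0, rel_len):
--             for end in range(start + 1, rel_len + 1):
--                 if end - start >= rel_len:
--                     continue
--                 sub_nodes = nodes_t[start : end + 1]
--                 sub_rels = rels_t[start:end]
--                 covered.add((sub_nodes, sub_rels))
--
--     return kept, removed
-- ===== SOURCE B (Python) =====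
-- def _filter_contained_paths_for_domain_listing(records):
--     """Drop paths that are contiguous subpaths of a longer kept path.
--
--     Instead of materializing the set of all contiguous subpaths of every kept
--     path (as the covered-set approach does), scan each candidate directly
--     against the signatures kept so far with a substring search.
--     """
--     if len(records) <= 1:
--         return records, 0
--
--     normalized = [
--         (
--             tuple(str(n) for n in record.get("nodes")),
--             tuple(str(r) for r in record.get("relations")),
--             record,
--         )
--         for record in records
--         if isinstance(record.get("nodes"), list)
--         and isinstance(record.get("relations"), list)
--     ]
--     normalized.sort(key=lambda item: len(item[1]), reverse=True)
--
--     kept_sigs = []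
--     kept = []
--     removed = 0
--     for nodes_t, rels_t, record in normalized:
--         if _is_contained(nodes_t, rels_t, kept_sigs):
--             removed += 1
--         else:
--             kept.append(record)
--             kept_sigs.append((nodes_t, rels_t))
--     return kept, removed
--
--
-- def _is_contained(nodes_t, rels_t, kept_sigs):
--     """True iff (nodes_t, rels_t) occurs as a strictly shorter contiguous subpath
--     of one of the kept signatures."""
--     length = len(rels_t)
--     if length == 0:
--         return False
--     for n, r in kept_sigs:
--         if len(r) <= length:
--             continue
--         for start in range(len(r) - length + 1):
--             if (
--                 r[start : start + length] == rels_t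
--                 and n[start : start + length + 1] == nodes_t
--             ):
--                 return True
--     return False
-- ===== Notes on version B (the rewrite author's own statement) =====
-- stated objective: alternative
-- what changed: B drops A's covered-set that materializes (and hashes) every strictly shorter contiguous subpath of each kept path, and instead tests each candidate directly against the kept signatures with a windowed substring scan in the same descending-length order.
import Mathlib
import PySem

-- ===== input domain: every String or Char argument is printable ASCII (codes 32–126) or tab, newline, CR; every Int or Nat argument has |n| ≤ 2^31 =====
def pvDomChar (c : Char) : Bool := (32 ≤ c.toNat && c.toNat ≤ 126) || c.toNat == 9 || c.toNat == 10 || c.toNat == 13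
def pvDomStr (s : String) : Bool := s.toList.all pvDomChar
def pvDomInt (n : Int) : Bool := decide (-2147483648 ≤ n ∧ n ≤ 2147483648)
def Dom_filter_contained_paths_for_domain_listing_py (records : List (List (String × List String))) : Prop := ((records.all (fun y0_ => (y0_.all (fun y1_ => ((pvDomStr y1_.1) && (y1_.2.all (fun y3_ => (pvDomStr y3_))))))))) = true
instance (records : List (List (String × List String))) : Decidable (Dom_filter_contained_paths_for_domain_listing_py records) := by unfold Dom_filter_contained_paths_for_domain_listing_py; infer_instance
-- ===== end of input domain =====

-- B replaces A's materialized covered-set of all contiguous subpaths by a direct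
-- substring scan of each candidate against the signatures kept so far (alternative algorithm).

-- ===== PORT A =====
-- A builds `normalized` by appending in a loop, sorts by relation length descending,
-- then marks every strictly shorter contiguous subpath of each kept path in a set.
-- (str(n) on a str is the identity, so `tuple(str(n) for n in nodes)` is ported as `nodes`.)
def filter_contained_paths_for_domain_listing_py (records : List (List (String × List String))) :
    (List (List (String × List String))) × Int :=
  if records.length ≤ 1 then (records, 0) else
    let normalized : List (List String × List String × List (String × List String)) :=
      records.foldl (fun acc record =>
        match (PySem.Dict.mk record).get? "nodes", (PySem.Dict.mk record).get? "relations" with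
        | some nodes, some rels => acc ++ [(nodes, rels, record)]
        | _, _ => acc) []
    let sortedRecs := PySem.List.sorted normalized (fun item => PySem.List.len item.2.1) true
    let final := sortedRecs.foldl (fun st item =>
        let sig := (item.1, item.2.1)
        if PySem.Set.contains st.1 sig then (st.1, st.2.1, st.2.2 + 1)
        else
          let kept := st.2.1 ++ [item.2.2]
          let relLen : Int := PySem.List.len item.2.1
          if relLen ≤ 0 then (st.1, kept, st.2.2)
          else
            ((PySem.List.pyRange 0 relLen 1).foldl (fun cov start =>
                (PySem.List.pyRange (start + 1) (relLen + 1) 1).foldl (fun cov stop =>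
                    if relLen ≤ stop - start then cov
                    else PySem.Set.add cov
                      (PySem.List.slice item.1 (some start) (some (stop + 1)),
                       PySem.List.slice item.2.1 (some start) (some stop))) cov) st.1,
             kept, st.2.2))
      ((PySem.Set.empty : PySem.Set (List String × List String)),
       ([] : List (List (String × List String))), (0 : Int))
    (final.2.1, final.2.2)

-- ===== PORT B =====
-- B normalizes with a comprehension (filterMap), sorts the same way, and tests each
-- candidate directly against the kept signatures instead of building a covered set.
def altNormalize (records : List (List (String × List String))) :
    List (List String × List String × List (String × List String)) :=
  records.filterMap (fun record =>
    ((PySem.Dict.mk record).get? "nodes").bind (fun nodes =>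
      ((PySem.Dict.mk record).get? "relations").map (fun rels => (nodes, rels, record))))

def altIsContained (nodes_t rels_t : List String)
    (keptSigs : List (List String × List String)) : Bool :=
  let length : Int := PySem.List.len rels_t
  if length = 0 then false
  else keptSigs.any (fun sig =>
    if PySem.List.len sig.2 ≤ length then false
    else (PySem.List.pyRange 0 (PySem.List.len sig.2 - length + 1) 1).any (fun start =>
      PySem.List.slice sig.2 (some start) (some (start + length)) == rels_t &&
      PySem.List.slice sig.1 (some start) (some (start + length + 1)) == nodes_t))

def filter_contained_paths_for_domain_listing_py_alt (records : List (List (String × List String))) :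
    (List (List (String × List String))) × Int :=
  if records.length ≤ 1 then (records, 0) else
    let sortedRecs := PySem.List.sorted (altNormalize records) (fun item => PySem.List.len item.2.1) true
    let final := sortedRecs.foldl (fun st item =>
        if altIsContained item.1 item.2.1 st.1 then (st.1, st.2.1, st.2.2 + 1)
        else (st.1 ++ [(item.1, item.2.1)], st.2.1 ++ [item.2.2], st.2.2))
      (([] : List (List String × List String)),
       ([] : List (List (String × List String))), (0 : Int))
    (final.2.1, final.2.2)

-- ===== PRECONDITION & SPEC =====
def Spec_filter_contained_paths_for_domain_listing_py (records : List (List (String × List String))) (out : (List (List (String × List String))) × Int) : Prop := out = filter_contained_paths_for_domain_listing_py_alt records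
instance (records : List (List (String × List String))) (out : (List (List (String × List String))) × Int) : Decidable (Spec_filter_contained_paths_for_domain_listing_py records out) := by unfold Spec_filter_contained_paths_for_domain_listing_py; infer_instance

-- ===== CLAIM (what is proved, stated in full; the proofs are below) =====
def Claim_equal_filter_contained_paths_for_domain_listing_py : Prop := ∀ (records : List (List (String × List String))), Dom_filter_contained_paths_for_domain_listing_py records → Spec_filter_contained_paths_for_domain_listing_py records (filter_contained_paths_for_domain_listing_py records)

-- ===== LEMMAS AND PROOFS =====

-- "(nt, rt) is a strictly shorter contiguous subpath of (N, R)"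
def SubMatch (N R nt rt : List String) : Prop :=
  ∃ start : Int, 0 ≤ start ∧ start + PySem.List.len rt ≤ PySem.List.len R ∧
    1 ≤ PySem.List.len rt ∧ PySem.List.len rt < PySem.List.len R ∧
    PySem.List.slice R (some start) (some (start + PySem.List.len rt)) = rt ∧
    PySem.List.slice N (some start) (some (start + PySem.List.len rt + 1)) = nt

lemma pvMemFoldlAddSkip {β σ : Type} [BEq σ] [LawfulBEq σ]
    (l : List β) (c : β → Prop) [DecidablePred c] (f : β → σ) :
    ∀ (s : PySem.Set σ) (y : σ),
      (y ∈ l.foldl (fun cov b => if c b then cov else PySem.Set.add cov (f b)) s) ↔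
        y ∈ s ∨ ∃ b ∈ l, ¬ c b ∧ y = f b := by
  induction l with
  | nil => intro s y; simp
  | cons b t ih =>
    intro s y
    simp only [List.foldl_cons]
    by_cases h : c b
    · rw [if_pos h, ih]
      simp only [List.mem_cons]
      constructor
      · rintro (hy | ⟨b', hb', hc, hy⟩)
        · exact Or.inl hy
        · exact Or.inr ⟨b', Or.inr hb', hc, hy⟩
      · rintro (hy | ⟨b', (rfl | hb'), hc, hy⟩)
        · exact Or.inl hy
        · exact absurd h hc
        · exact Or.inr ⟨b', hb', hc, hy⟩
    · rw [if_neg h, ih]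
      simp only [PySem.Set.mem_add, List.mem_cons]
      constructor
      · rintro ((hy | rfl) | ⟨b', hb', hc, hy⟩)
        · exact Or.inl hy
        · exact Or.inr ⟨b, Or.inl rfl, h, rfl⟩
        · exact Or.inr ⟨b', Or.inr hb', hc, hy⟩
      · rintro (hy | ⟨b', (rfl | hb'), hc, hy⟩)
        · exact Or.inl (Or.inl hy)
        · exact Or.inl (Or.inr hy)
        · exact Or.inr ⟨b', hb', hc, hy⟩

lemma pvMemFoldlOuter {σ : Type} (l : List Int)
    (g : PySem.Set σ → Int → PySem.Set σ) (Q : Int → σ → Prop)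
    (hg : ∀ s b y, y ∈ g s b ↔ y ∈ s ∨ Q b y) :
    ∀ (s : PySem.Set σ) (y : σ), y ∈ l.foldl g s ↔ y ∈ s ∨ ∃ b ∈ l, Q b y := by
  induction l with
  | nil => intro s y; simp
  | cons b t ih =>
    intro s y
    simp only [List.foldl_cons]
    rw [ih, hg]
    simp only [List.mem_cons]
    constructor
    · rintro ((hy | hq) | ⟨b', hb', hq⟩)
      · exact Or.inl hy
      · exact Or.inr ⟨b, Or.inl rfl, hq⟩
      · exact Or.inr ⟨b', Or.inr hb', hq⟩
    · rintro (hy | ⟨b', (rfl | hb'), hq⟩)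
      · exact Or.inl (Or.inl hy)
      · exact Or.inl (Or.inr hq)
      · exact Or.inr ⟨b', hb', hq⟩

lemma pvClampIdxOfNonnegLe {n : Nat} {i : Int} (h0 : 0 ≤ i) (hn : i ≤ (n : Int)) :
    (PySem.List.clampIdx n i : Int) = i := by
  simp only [PySem.List.clampIdx]
  rw [if_neg (by omega)]
  omega

-- length of a slice with in-range nonnegative bounds
lemma pvLenSliceOfBounds {R : List String} {s e : Int} (h0 : 0 ≤ s) (hse : s ≤ e)
    (he : e ≤ PySem.List.len R) :
    PySem.List.len (PySem.List.slice R (some s) (some e)) = e - s := by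
  simp only [PySem.List.len_eq] at *
  rw [PySem.List.length_slice]
  have h1 := pvClampIdxOfNonnegLe (n := R.length) h0 (by omega)
  have h2 := pvClampIdxOfNonnegLe (n := R.length) (by omega) he
  omega

-- A's double loop over (start, stop) marks exactly the SubMatch subpaths of (N, R)
lemma pvCoveredStepIff (N R : List String) (cov : PySem.Set (List String × List String))
    (nt rt : List String) :
    ((nt, rt) ∈ (PySem.List.pyRange 0 (PySem.List.len R) 1).foldl (fun cov start =>
        (PySem.List.pyRange (start + 1) (PySem.List.len R + 1) 1).foldl (fun cov stop =>
            if PySem.List.len R ≤ stop - start then cov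
            else PySem.Set.add cov
              (PySem.List.slice N (some start) (some (stop + 1)),
               PySem.List.slice R (some start) (some stop))) cov) cov) ↔
      (nt, rt) ∈ cov ∨ SubMatch N R nt rt := by
  rw [pvMemFoldlOuter _ _
      (fun start y => ∃ stop ∈ PySem.List.pyRange (start + 1) (PySem.List.len R + 1) 1,
        ¬ PySem.List.len R ≤ stop - start ∧
          y = (PySem.List.slice N (some start) (some (stop + 1)),
               PySem.List.slice R (some start) (some stop)))
      (fun s b y => pvMemFoldlAddSkip _ _ _ s y)]
  constructor
  · rintro (h | ⟨st, hst, stop, hstop, hlt, heq⟩)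
    · exact Or.inl h
    · right
      rw [Prod.mk.injEq] at heq
      obtain ⟨rfl, rfl⟩ := heq
      rw [PySem.List.mem_pyRange_one] at hst hstop
      have hlen : PySem.List.len (PySem.List.slice R (some st) (some stop)) = stop - st :=
        pvLenSliceOfBounds (by omega) (by omega) (by omega)
      refine ⟨st, by omega, ?_, ?_, ?_, ?_, ?_⟩ <;> rw [hlen]
      · omega
      · omega
      · omega
      · have : st + (stop - st) = stop := by omega
        rw [this]
      · have : st + (stop - st) + 1 = stop + 1 := by omega
        rw [this]
  · rintro (h | ⟨st, h0, hle, h1, hlt, hR, hN⟩)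
    · exact Or.inl h
    · right
      refine ⟨st, ?_, st + PySem.List.len rt, ?_, by omega, ?_⟩
      · rw [PySem.List.mem_pyRange_one]; omega
      · rw [PySem.List.mem_pyRange_one]; omega
      · rw [hR, hN]

-- B's containment test is the same predicate over the kept signatures
lemma pvAltIsContainedIff (nt rt : List String) (sigs : List (List String × List String)) :
    altIsContained nt rt sigs = true ↔ ∃ sig ∈ sigs, SubMatch sig.1 sig.2 nt rt := by
  unfold altIsContained
  by_cases h0 : PySem.List.len rt = 0
  · rw [if_pos h0]
    constructor
    · intro h; exact absurd h (by simp)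
    · rintro ⟨sig, _, st, _, _, h1, _, _⟩; omega
  · rw [if_neg h0]
    have hlen0 : (0 : Int) ≤ PySem.List.len rt := by
      simp only [PySem.List.len_eq]; positivity
    rw [List.any_eq_true]
    constructor
    · rintro ⟨sig, hsig, hx⟩
      by_cases hL : PySem.List.len sig.2 ≤ PySem.List.len rt
      · rw [if_pos hL] at hx; exact absurd hx (by simp)
      · rw [if_neg hL] at hx
        rw [List.any_eq_true] at hx
        obtain ⟨st, hst, heq⟩ := hx
        rw [PySem.List.mem_pyRange_one] at hst
        rw [Bool.and_eq_true, beq_iff_eq, beq_iff_eq] at heq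
        exact ⟨sig, hsig, st, by omega, by omega, by omega, by omega, heq.1, heq.2⟩
    · rintro ⟨sig, hsig, st, hs0, hse, h1, hlt, hR, hN⟩
      refine ⟨sig, hsig, ?_⟩
      rw [if_neg (by omega)]
      rw [List.any_eq_true]
      refine ⟨st, ?_, ?_⟩
      · rw [PySem.List.mem_pyRange_one]; omega
      · rw [Bool.and_eq_true, beq_iff_eq, beq_iff_eq]; exact ⟨hR, hN⟩

-- the two normalization passes agree
lemma pvNormalizeEq (records : List (List (String × List String)))
    (acc : List (List String × List String × List (String × List String))) :
    records.foldl (fun acc record =>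
        match (PySem.Dict.mk record).get? "nodes", (PySem.Dict.mk record).get? "relations" with
        | some nodes, some rels => acc ++ [(nodes, rels, record)]
        | _, _ => acc) acc = acc ++ altNormalize records := by
  induction records generalizing acc with
  | nil => simp [altNormalize]
  | cons r t ih =>
    simp only [List.foldl_cons]
    cases h1 : (PySem.Dict.mk r).get? "nodes" with
    | none => rw [ih]; simp [altNormalize, h1]
    | some nodes =>
      cases h2 : (PySem.Dict.mk r).get? "relations" with
      | none => rw [ih]; simp [altNormalize, h1, h2]
      | some rels => rw [ih]; simp [altNormalize, h1, h2]

-- main loop: A's (covered, kept, removed) and B's (sigs, kept, removed) stay in lockstep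
lemma pvLoopEq (l : List (List String × List String × List (String × List String)))
    (cov : PySem.Set (List String × List String)) (sigs : List (List String × List String))
    (kept : List (List (String × List String))) (removed : Int)
    (hinv : ∀ nt rt, ((nt, rt) ∈ cov ↔ ∃ sig ∈ sigs, SubMatch sig.1 sig.2 nt rt)) :
    (l.foldl (fun st item =>
        let sig := (item.1, item.2.1)
        if PySem.Set.contains st.1 sig then (st.1, st.2.1, st.2.2 + 1)
        else
          let kept := st.2.1 ++ [item.2.2]
          let relLen : Int := PySem.List.len item.2.1
          if relLen ≤ 0 then (st.1, kept, st.2.2)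
          else
            ((PySem.List.pyRange 0 relLen 1).foldl (fun cov start =>
                (PySem.List.pyRange (start + 1) (relLen + 1) 1).foldl (fun cov stop =>
                    if relLen ≤ stop - start then cov
                    else PySem.Set.add cov
                      (PySem.List.slice item.1 (some start) (some (stop + 1)),
                       PySem.List.slice item.2.1 (some start) (some stop))) cov) st.1,
             kept, st.2.2)) (cov, kept, removed)).2 =
    (l.foldl (fun st item =>
        if altIsContained item.1 item.2.1 st.1 then (st.1, st.2.1, st.2.2 + 1)
        else (st.1 ++ [(item.1, item.2.1)], st.2.1 ++ [item.2.2], st.2.2))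
      (sigs, kept, removed)).2 := by
  induction l generalizing cov sigs kept removed with
  | nil => rfl
  | cons item t ih =>
    simp only [List.foldl_cons]
    have hcond : PySem.Set.contains cov (item.1, item.2.1) = altIsContained item.1 item.2.1 sigs := by
      rw [Bool.eq_iff_iff, PySem.Set.contains_iff, pvAltIsContainedIff]
      exact hinv item.1 item.2.1
    by_cases hc : altIsContained item.1 item.2.1 sigs = true
    · rw [hcond, if_pos hc, if_pos hc]
      exact ih cov sigs kept (removed + 1) hinv
    · rw [hcond, if_neg hc, if_neg hc]
      by_cases hz : PySem.List.len item.2.1 ≤ 0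
      · rw [if_pos hz]
        apply ih
        intro nt rt
        rw [hinv nt rt]
        constructor
        · rintro ⟨sig, hsig, hm⟩; exact ⟨sig, List.mem_append_left _ hsig, hm⟩
        · rintro ⟨sig, hsig, hm⟩
          rcases List.mem_append.mp hsig with h | h
          · exact ⟨sig, h, hm⟩
          · exfalso
            rcases List.mem_singleton.mp h with rfl
            obtain ⟨st, _, _, h1, hlt, _⟩ := hm
            have hlt' : PySem.List.len rt < PySem.List.len item.2.1 := hlt
            omega
      · rw [if_neg hz]
        apply ih
        intro nt rt
        rw [pvCoveredStepIff, hinv nt rt]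
        constructor
        · rintro (⟨sig, hsig, hm⟩ | hm)
          · exact ⟨sig, List.mem_append_left _ hsig, hm⟩
          · exact ⟨(item.1, item.2.1), List.mem_append_right _ (List.mem_singleton.mpr rfl), hm⟩
        · rintro ⟨sig, hsig, hm⟩
          rcases List.mem_append.mp hsig with h | h
          · exact Or.inl ⟨sig, h, hm⟩
          · rcases List.mem_singleton.mp h with rfl
            exact Or.inr hm

-- ===== VERDICT (by name: the statement is the Claim_ definition above) =====
theorem filter_contained_paths_for_domain_listing_py_spec : Claim_equal_filter_contained_paths_for_domain_listing_py := by
  intro records _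
  unfold Spec_filter_contained_paths_for_domain_listing_py
  unfold filter_contained_paths_for_domain_listing_py filter_contained_paths_for_domain_listing_py_alt
  by_cases h : records.length ≤ 1
  · rw [if_pos h, if_pos h]
  · rw [if_neg h, if_neg h]
    simp only
    rw [pvNormalizeEq records [], List.nil_append]
    rw [pvLoopEq _ PySem.Set.empty [] [] 0 (by intro nt rt; simp [PySem.Set.empty])]
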